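-- pv_equiv track=rewrite | github.com/JakobKallestad/Pickup-and-Delivery-Problem---RL-2 | verify_solution.py | double_to_single
-- ===== SOURCE A (Python) =====
-- def double_to_single(sol):
--     new_sol = []
--     memory = set()
--     for e in sol[0]:
--         if e in memory:
--             new_sol.append(e*2)
--         else:
--             new_sol.append(e*2-1)
--         memory.add(e)
--     return new_sol
-- ===== SOURCE B (Python) =====
-- def double_to_single(sol):
--     first = {}
--     for i, e in enumerate(sol[0]):
--         if e not in first:
--             first[e] = i
--     return [e * 2 - 1 if first[e] == i else e * 2 for i, e in enumerate(sol[0])]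
-- ===== Notes on version B (the rewrite author's own statement) =====
-- stated objective: alternative
-- what changed: Replaces the single pass with a growing visited-set by a two-phase decomposition: one pass builds a first-occurrence index table, a second pass emits 2e-1 exactly at the recorded first index and 2e elsewhere.
-- outside the precondition, e.g. on double_to_single([]): A raises IndexError, B raises IndexError
import Mathlib
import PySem

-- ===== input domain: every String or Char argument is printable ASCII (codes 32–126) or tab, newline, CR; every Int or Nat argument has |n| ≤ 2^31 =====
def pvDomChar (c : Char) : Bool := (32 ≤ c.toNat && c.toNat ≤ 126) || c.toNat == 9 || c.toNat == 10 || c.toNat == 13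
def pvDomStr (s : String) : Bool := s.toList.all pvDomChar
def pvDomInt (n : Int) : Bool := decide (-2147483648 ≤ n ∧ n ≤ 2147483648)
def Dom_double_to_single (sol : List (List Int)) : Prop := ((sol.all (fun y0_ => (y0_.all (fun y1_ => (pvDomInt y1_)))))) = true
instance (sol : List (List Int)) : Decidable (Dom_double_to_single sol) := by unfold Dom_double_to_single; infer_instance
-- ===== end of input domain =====

-- B replaces A's single pass with a running visited-set by a first-occurrence index
-- table built in one pass and a second index-comparing pass (alternative decomposition,
-- same cost). Equivalence of the RETURN value is proved for nonempty sol.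

-- ===== PORT A =====
def double_to_single (sol : List (List Int)) : List Int :=
  ((PySem.List.pyGetD sol 0 []).foldl
    (fun (st : List Int × PySem.Set Int) e =>
      if PySem.Set.contains st.2 e then (st.1 ++ [e * 2], PySem.Set.add st.2 e)
      else (st.1 ++ [e * 2 - 1], PySem.Set.add st.2 e))
    ([], PySem.Set.empty)).1

-- ===== PORT B =====
def double_to_single_alt (sol : List (List Int)) : List Int :=
  let xs := PySem.List.pyGetD sol 0 []
  let first := (PySem.List.enumerate xs).foldl
    (fun (d : PySem.Dict Int Int) p => if d.contains p.2 then d else d.insert p.2 p.1)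
    PySem.Dict.empty
  (PySem.List.enumerate xs).map
    (fun p => if first.getD p.2 0 = p.1 then p.2 * 2 - 1 else p.2 * 2)

-- ===== PRECONDITION & SPEC =====
-- Pre_ excludes only sol = [], on which Python's sol[0] raises IndexError (in A and B alike).
def Pre_double_to_single (sol : List (List Int)) : Prop := sol ≠ []
instance (sol : List (List Int)) : Decidable (Pre_double_to_single sol) := by unfold Pre_double_to_single; infer_instance
def pvWitness_double_to_single : List (List Int) := [[1, 2, 2, 1, 3]]
def Spec_double_to_single (sol : List (List Int)) (out : List Int) : Prop := out = double_to_single_alt sol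
instance (sol : List (List Int)) (out : List Int) : Decidable (Spec_double_to_single sol out) := by unfold Spec_double_to_single; infer_instance

-- ===== CLAIM (what is proved, stated in full; the proofs are below) =====
def Claim_equal_double_to_single : Prop := ∀ (sol : List (List Int)), Dom_double_to_single sol → Pre_double_to_single sol → Spec_double_to_single sol (double_to_single sol)

-- ===== LEMMAS AND PROOFS =====

-- reference: codes pre rest = output for rest, given that pre already occurred
def pvCodes : List Int → List Int → List Int
  | _, [] => []
  | pre, e :: t => (if e ∈ pre then e * 2 else e * 2 - 1) :: pvCodes (pre ++ [e]) t

-- first index of e in xs, counting from s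
def pvFirstIdx (e : Int) : List Int → Int → Option Int
  | [], _ => none
  | x :: t, s => if x = e then some s else pvFirstIdx e t (s + 1)

lemma pvFirstIdx_bounds (e : Int) (u : List Int) (s v : Int)
    (h : pvFirstIdx e u s = some v) : s ≤ v ∧ v < s + u.length := by
  induction u generalizing s with
  | nil => simp [pvFirstIdx] at h
  | cons x t ih =>
    simp only [pvFirstIdx] at h
    split at h
    · cases h; simp only [List.length_cons]; omega
    · have := ih (s + 1) h
      simp only [List.length_cons]; omega

lemma pvFirstIdx_none_iff (e : Int) (u : List Int) (s : Int) :
    pvFirstIdx e u s = none ↔ e ∉ u := by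
  induction u generalizing s with
  | nil => simp [pvFirstIdx]
  | cons x t ih =>
    simp only [pvFirstIdx]
    by_cases hx : x = e
    · subst hx; simp
    · rw [if_neg hx, ih (s + 1)]
      simp only [List.mem_cons, not_or]
      constructor
      · exact fun h => ⟨fun he => hx he.symm, h⟩
      · exact fun h => h.2

lemma pvFirstIdx_append (e : Int) (u v : List Int) (s : Int) :
    pvFirstIdx e (u ++ v) s =
      match pvFirstIdx e u s with
      | some w => some w
      | none => pvFirstIdx e v (s + u.length) := by
  induction u generalizing s with
  | nil => simp [pvFirstIdx]
  | cons x t ih =>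
    simp only [List.cons_append, pvFirstIdx]
    split
    · rfl
    · rw [ih (s + 1)]
      have h : s + 1 + (t.length : Int) = s + ((x :: t).length : Int) := by
        simp only [List.length_cons]; push_cast; ring
      rw [h]

-- A's fold computes pvCodes
lemma pvA_fold (xs : List Int) : ∀ (acc pre : List Int) (mem : PySem.Set Int),
    (∀ x : Int, x ∈ mem ↔ x ∈ pre) →
    (xs.foldl
      (fun (st : List Int × PySem.Set Int) e =>
        if PySem.Set.contains st.2 e then (st.1 ++ [e * 2], PySem.Set.add st.2 e)
        else (st.1 ++ [e * 2 - 1], PySem.Set.add st.2 e))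
      (acc, mem)).1 = acc ++ pvCodes pre xs := by
  induction xs with
  | nil => intro acc pre mem _; simp [pvCodes]
  | cons e t ih =>
    intro acc pre mem hmem
    simp only [List.foldl_cons, pvCodes]
    by_cases he : e ∈ pre
    · have hc : PySem.Set.contains mem e = true := by
        rw [PySem.Set.contains_iff]; exact (hmem e).2 he
      rw [if_pos hc]
      rw [ih (acc ++ [e * 2]) (pre ++ [e]) (PySem.Set.add mem e)
        (by intro x; rw [PySem.Set.mem_add, hmem x]; simp)]
      simp [he]
    · have hc : ¬ PySem.Set.contains mem e = true := by
        rw [PySem.Set.contains_iff]; exact fun h => he ((hmem e).1 h)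
      rw [if_neg hc]
      rw [ih (acc ++ [e * 2 - 1]) (pre ++ [e]) (PySem.Set.add mem e)
        (by intro x; rw [PySem.Set.mem_add, hmem x]; simp)]
      simp [he]

-- B's dict fold computes pvFirstIdx
lemma pvB_dict (xs : List Int) : ∀ (s : Int) (d : PySem.Dict Int Int) (e : Int),
    ((PySem.List.enumerate xs s).foldl
      (fun (d : PySem.Dict Int Int) p => if d.contains p.2 then d else d.insert p.2 p.1)
      d).get? e =
    match d.get? e with
    | some v => some v
    | none => pvFirstIdx e xs s := by
  induction xs with
  | nil => intro s d e; simp [PySem.List.enumerate_nil, pvFirstIdx]; cases d.get? e <;> simp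
  | cons x t ih =>
    intro s d e
    rw [PySem.List.enumerate_cons]
    simp only [List.foldl_cons]
    by_cases hc : d.contains x = true
    · rw [if_pos hc, ih (s + 1) d e]
      rcases hde : d.get? e with _ | v
      · simp only [pvFirstIdx]
        split <;> rename_i hxe
        · subst hxe
          rw [PySem.Dict.contains_eq_isSome_get?, hde] at hc
          simp at hc
        · rfl
      · simp
    · rw [if_neg hc, ih (s + 1) (d.insert x s) e]
      by_cases hxe : x = e
      · subst hxe
        rw [PySem.Dict.get?_insert_self]
        rw [PySem.Dict.contains_eq_isSome_get?] at hc
        rcases hde : d.get? x with _ | v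
        · simp [pvFirstIdx]
        · rw [hde] at hc; simp at hc
      · rw [PySem.Dict.get?_insert_of_ne (hne := fun h => hxe h.symm)]
        rcases hde : d.get? e with _ | v
        · simp only [pvFirstIdx, if_neg hxe]
        · simp

-- B's map pass computes pvCodes
lemma pvB_map (rest : List Int) : ∀ (pre : List Int),
    (PySem.List.enumerate rest (pre.length : Int)).map
      (fun p => if (pvFirstIdx p.2 (pre ++ rest) 0).getD 0 = p.1 then p.2 * 2 - 1 else p.2 * 2)
    = pvCodes pre rest := by
  induction rest with
  | nil => intro pre; simp [PySem.List.enumerate_nil, pvCodes]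
  | cons e t ih =>
    intro pre
    rw [PySem.List.enumerate_cons]
    simp only [List.map_cons, pvCodes]
    congr 1
    case _ =>
      -- head element
      by_cases he : e ∈ pre
      · rw [if_neg, if_pos he]
        rcases hu : pvFirstIdx e pre 0 with _ | w
        · rw [pvFirstIdx_none_iff] at hu; exact absurd he hu
        · rw [pvFirstIdx_append, hu]
          have := pvFirstIdx_bounds e pre 0 w hu
          simp only [Option.getD_some]
          omega
      · rw [if_pos, if_neg he]
        have hu : pvFirstIdx e pre 0 = none := (pvFirstIdx_none_iff e pre 0).2 he
        rw [pvFirstIdx_append, hu]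
        simp [pvFirstIdx]
    case _ =>
      have := ih (pre ++ [e])
      rw [List.append_assoc] at this
      simp only [List.singleton_append] at this
      rw [show (((pre ++ [e]).length : Nat) : Int) = (pre.length : Int) + 1 from by simp] at this
      exact this

theorem double_to_single_spec : Claim_equal_double_to_single := by
  intro sol _ hpre
  unfold Spec_double_to_single double_to_single double_to_single_alt
  set xs := PySem.List.pyGetD sol 0 [] with hxs
  rw [pvA_fold xs [] [] PySem.Set.empty (by intro x; simp [PySem.Set.empty])]
  have hmap := pvB_map xs []
  simp only [List.nil_append, List.length_nil, Int.ofNat_zero] at hmap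
  rw [List.nil_append]
  rw [← hmap]
  apply List.map_congr_left
  intro p hp
  have hd := pvB_dict xs 0 PySem.Dict.empty p.2
  rw [PySem.Dict.get?_empty] at hd
  simp only at hd
  rw [PySem.Dict.getD_eq_get?_getD, hd]
  rfl
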